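-- pv_equiv track=rewrite | github.com/kurusnsn/cross-script-alignment | backend/app/services/alignment_service.py | _split_by_paragraphs
-- ===== SOURCE A (Python) =====
-- from typing import Dict, List, Set, Tuple
--
-- def _split_by_paragraphs(
--     tokens: List[str], raw_text: str
-- ) -> List[Tuple[int, int]]:
--     """Split tokens into paragraph-based chunks using raw text newlines.
--
--     Splits raw_text by blank lines (or single newlines), tokenises each
--     paragraph, and maps back to token index ranges.
--     """
--     paragraphs = [p.strip() for p in raw_text.strip().split("\n") if p.strip()]
--     if len(paragraphs) <= 1:
--         return [(0, len(tokens))]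
--
--     chunks: List[Tuple[int, int]] = []
--     token_idx = 0
--     for para in paragraphs:
--         para_tokens = para.split()
--         para_len = len(para_tokens)
--         if para_len == 0:
--             continue
--         start = token_idx
--         end = min(token_idx + para_len, len(tokens))
--         chunks.append((start, end))
--         token_idx = end
--
--     # Any remaining tokens go into the last chunk
--     if token_idx < len(tokens) and chunks:
--         last_start, _ = chunks[-1]
--         chunks[-1] = (last_start, len(tokens))
--
--     return chunks
-- ===== SOURCE B (Python) =====
-- from typing import List, Tuple
--
--
-- def _split_by_paragraphs(
--     tokens: List[str], raw_text: str
-- ) -> List[Tuple[int, int]]: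
--     """Split tokens into paragraph-based chunks using raw text newlines.
--
--     Builds the chunk list BACK-TO-FRONT: walking the paragraphs in reverse,
--     it maintains the suffix word count, so each start is the clamped count of
--     words before that paragraph and each end is the start of the chunk built
--     just before it (the last chunk naturally ends at len(tokens), so no
--     post-hoc fixup is needed).
--     """
--     paragraphs = [p.strip() for p in raw_text.strip().split("\n") if p.strip()]
--     if len(paragraphs) <= 1:
--         return [(0, len(tokens))]
--
--     total = len(tokens)
--     lengths = [len(p.split()) for p in paragraphs]
--     remaining = sum(lengths)
--     chunks: List[Tuple[int, int]] = []
--     end = total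
--     for length in reversed(lengths):
--         remaining -= length
--         start = min(remaining, total)
--         chunks.append((start, end))
--         end = start
--     chunks.reverse()
--     return chunks
-- ===== Notes on version B (the rewrite author's own statement) =====
-- stated objective: alternative
-- what changed: A's forward append loop with a clamped running token index and a conditional post-hoc fixup of the last chunk is replaced by a reverse traversal that builds the chunk list back-to-front from suffix word counts (each start is the clamped count of words before the paragraph, each end is the previously built start, and the last chunk ends at len(tokens) by construction, so no fixup exists).
import Mathlib
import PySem

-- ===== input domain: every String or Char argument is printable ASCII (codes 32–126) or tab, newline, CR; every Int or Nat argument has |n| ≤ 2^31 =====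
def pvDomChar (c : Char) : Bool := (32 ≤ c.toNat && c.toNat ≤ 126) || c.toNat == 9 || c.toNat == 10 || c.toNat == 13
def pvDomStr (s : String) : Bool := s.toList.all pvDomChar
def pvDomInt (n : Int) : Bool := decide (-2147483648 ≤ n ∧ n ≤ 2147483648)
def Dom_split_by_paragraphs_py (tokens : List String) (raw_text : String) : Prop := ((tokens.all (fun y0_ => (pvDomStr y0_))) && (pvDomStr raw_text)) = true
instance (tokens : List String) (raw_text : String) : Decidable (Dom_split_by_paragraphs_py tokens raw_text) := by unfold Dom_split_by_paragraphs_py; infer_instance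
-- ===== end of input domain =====

set_option maxHeartbeats 600000


-- B builds the chunk list back-to-front from suffix word counts (reverse traversal, no
-- last-chunk fixup) instead of A's forward running-index loop with a conditional fixup.

-- ===== PORT A =====
def split_by_paragraphs_py (tokens : List String) (raw_text : String) : List (Int × Int) :=
  let paragraphs : List String :=
    ((PySem.Str.split? (PySem.Str.strip raw_text) "\n").getD []).filterMap
      (fun p => if PySem.Str.strip p ≠ "" then some (PySem.Str.strip p) else none)
  if paragraphs.length ≤ 1 then
    [((0 : Int), (tokens.length : Int))]
  else
    let st := paragraphs.foldl
      (fun (st : List (Int × Int) × Int) para =>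
        let para_tokens := PySem.Str.split₀ para
        let para_len : Int := para_tokens.length
        if para_len == 0 then st
        else
          let start := st.2
          let end_ := min (st.2 + para_len) (tokens.length : Int)
          (st.1 ++ [(start, end_)], end_))
      ([], 0)
    let chunks := st.1
    let token_idx := st.2
    if token_idx < (tokens.length : Int) ∧ chunks ≠ [] then
      match chunks.getLast? with
      | some (last_start, _) => chunks.dropLast ++ [(last_start, (tokens.length : Int))]
      | none => chunks
    else chunks

-- ===== PORT B =====
def split_by_paragraphs_py_alt (tokens : List String) (raw_text : String) : List (Int × Int) :=
  let paragraphs : List String :=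
    ((PySem.Str.split? (PySem.Str.strip raw_text) "\n").getD []).filterMap
      (fun p => if PySem.Str.strip p ≠ "" then some (PySem.Str.strip p) else none)
  if paragraphs.length ≤ 1 then
    [((0 : Int), (tokens.length : Int))]
  else
    let total : Int := tokens.length
    let lengths : List Int := paragraphs.map (fun p => ((PySem.Str.split₀ p).length : Int))
    -- for length in reversed(lengths): remaining -= length; start = min(remaining, total);
    --   chunks.append((start, end)); end = start
    let st := lengths.reverse.foldl
      (fun (st : Int × List (Int × Int) × Int) length =>
        let remaining := st.1 - length
        let start := min remaining total
        (remaining, st.2.1 ++ [(start, st.2.2)], start))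
      (lengths.sum, ([], total))
    st.2.1.reverse

-- ===== PRECONDITION & SPEC =====
def Spec_split_by_paragraphs_py (tokens : List String) (raw_text : String) (out : List (Int × Int)) : Prop := out = split_by_paragraphs_py_alt tokens raw_text
instance (tokens : List String) (raw_text : String) (out : List (Int × Int)) : Decidable (Spec_split_by_paragraphs_py tokens raw_text out) := by unfold Spec_split_by_paragraphs_py; infer_instance

-- ===== CLAIM (what is proved, stated in full; the proofs are below) =====
def Claim_equal_split_by_paragraphs_py : Prop := ∀ (tokens : List String) (raw_text : String), Dom_split_by_paragraphs_py tokens raw_text → Spec_split_by_paragraphs_py tokens raw_text (split_by_paragraphs_py tokens raw_text)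

-- ===== LEMMAS AND PROOFS =====

-- normal form of A's forward loop: chunk list and final index with a clamped running start
def pvChunksNF (T : Int) : Int → List Int → List (Int × Int)
  | _, [] => []
  | t, x :: xs => (t, min (t + x) T) :: pvChunksNF T (min (t + x) T) xs

def pvEndNF (T : Int) : Int → List Int → Int
  | t, [] => t
  | t, x :: xs => pvEndNF T (min (t + x) T) xs

-- normal form of B's reverse loop: chunks built back-to-front from the suffix count
def pvBwd (T : Int) : Int → Int → List Int → List (Int × Int)
  | _, _, [] => []
  | r, e, l :: lr => (min (r - l) T, e) :: pvBwd T (r - l) (min (r - l) T) lr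

-- replace the last chunk's end by T
def pvFixLast (T : Int) (c : List (Int × Int)) : List (Int × Int) :=
  match c.getLast? with
  | some (a, _) => c.dropLast ++ [(a, T)]
  | none => c

theorem pvFixLast_cons (T : Int) (x : Int × Int) (c : List (Int × Int)) (h : c ≠ []) :
    pvFixLast T (x :: c) = x :: pvFixLast T c := by
  rcases c with _ | ⟨d, ds⟩
  · exact absurd rfl h
  · unfold pvFixLast
    rcases hgl : (d :: ds).getLast? with _ | ⟨a, b⟩
    · simp at hgl
    · rw [List.getLast?_cons_cons, hgl]
      simp

-- A's fold computes the normal form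
theorem pvA_fold (T : Int) (ps : List String) :
    ∀ (c : List (Int × Int)) (t : Int), (∀ p ∈ ps, 0 < (PySem.Str.split₀ p).length) →
    ps.foldl (fun (st : List (Int × Int) × Int) para =>
        if (((PySem.Str.split₀ para).length : Int) == 0) then st
        else (st.1 ++ [(st.2, min (st.2 + ((PySem.Str.split₀ para).length : Int)) T)],
              min (st.2 + ((PySem.Str.split₀ para).length : Int)) T)) (c, t)
      = (c ++ pvChunksNF T t (ps.map (fun p => ((PySem.Str.split₀ p).length : Int))),
         pvEndNF T t (ps.map (fun p => ((PySem.Str.split₀ p).length : Int)))) := by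
  induction ps with
  | nil => intro c t _; simp [pvChunksNF, pvEndNF]
  | cons p ps ih =>
    intro c t h
    have hx : 0 < (PySem.Str.split₀ p).length := h p (by simp)
    have hx0 : ((((PySem.Str.split₀ p).length : Int)) == 0) = false := by
      simp only [beq_eq_false_iff_ne, ne_eq, Int.natCast_eq_zero]; omega
    simp only [List.foldl_cons, hx0, Bool.false_eq_true, if_false]
    rw [ih (c ++ [(t, min (t + ((PySem.Str.split₀ p).length : Int)) T)])
        (min (t + ((PySem.Str.split₀ p).length : Int)) T)
        (fun q hq => h q (by simp [hq]))]
    simp [pvChunksNF, pvEndNF]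

-- B's fold accumulates pvBwd
theorem pvB_fold (T : Int) (lr : List Int) :
    ∀ (r : Int) (c : List (Int × Int)) (e : Int),
    (lr.foldl (fun (st : Int × List (Int × Int) × Int) length =>
        (st.1 - length, st.2.1 ++ [(min (st.1 - length) T, st.2.2)], min (st.1 - length) T))
      (r, c, e)).2.1 = c ++ pvBwd T r e lr := by
  induction lr with
  | nil => intro r c e; simp [pvBwd]
  | cons l lr ih =>
    intro r c e
    simp only [List.foldl_cons]
    rw [ih]
    simp [pvBwd]

theorem pv_min_min (T s x : Int) (hx : 0 ≤ x) : min (min s T + x) T = min (s + x) T := by omega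

-- pvBwd splits over append
theorem pvBwd_append (T : Int) (xs ys : List Int) :
    ∀ (r e : Int), pvBwd T r e (xs ++ ys)
      = pvBwd T r e xs
        ++ pvBwd T (r - xs.sum) (if xs.isEmpty then e else min (r - xs.sum) T) ys := by
  induction xs with
  | nil => intro r e; simp [pvBwd]
  | cons x xs ih =>
    intro r e
    simp only [List.cons_append, pvBwd, ih (r - x) (min (r - x) T), List.sum_cons]
    have : r - x - xs.sum = r - (x + xs.sum) := by ring
    rw [this]
    by_cases hxs : xs = []
    · simp [hxs]
    · simp [List.isEmpty_iff, hxs]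

-- the bridge: B's back-to-front construction equals A's forward chunks with the last end set to T
theorem pv_bridge (T : Int) (ls : List Int) :
    ∀ s : Int, ls ≠ [] → (∀ x ∈ ls, 0 ≤ x) →
    (pvBwd T (s + ls.sum) T ls.reverse).reverse = pvFixLast T (pvChunksNF T (min s T) ls) := by
  induction ls with
  | nil => intro s h _; exact absurd rfl h
  | cons l ls ih =>
    intro s _ hnn
    have hl : 0 ≤ l := hnn l (by simp)
    cases ls with
    | nil =>
      simp [pvBwd, pvChunksNF, pvFixLast]
    | cons y ys =>
      have hne : (y :: ys) ≠ [] := by simp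
      have hsum : s + (l :: y :: ys).sum - (y :: ys).reverse.sum = s + l := by
        simp [List.sum_cons]; ring
      rw [List.reverse_cons, pvBwd_append]
      have hrevne : ((y :: ys).reverse).isEmpty = false := by simp
      rw [hrevne, hsum]
      simp only [pvBwd]
      rw [List.reverse_append]
      have hIH := ih (s + l) hne (fun x hx => hnn x (by simp [hx]))
      have hsum2 : s + (l :: y :: ys).sum = (s + l) + (y :: ys).sum := by
        simp [List.sum_cons]; ring
      rw [hsum2, hIH]
      -- LHS chunk head: (min s T, min (s+l) T) prepended
      have hstep : min (min s T + l) T = min (s + l) T := pv_min_min T s l hl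
      have hNF : pvChunksNF T (min s T) (l :: y :: ys)
          = (min s T, min (s + l) T) :: pvChunksNF T (min (s + l) T) (y :: ys) := by
        conv_lhs => rw [pvChunksNF]
        rw [hstep]
      rw [hNF, pvFixLast_cons T _ _ (by simp [pvChunksNF])]
      simp

theorem pvEnd_le (T : Int) (ps : List Int) :
    ∀ t : Int, t ≤ T → pvEndNF T t ps ≤ T := by
  induction ps with
  | nil => intro t ht; simpa [pvEndNF]
  | cons x xs ih => intro t ht; simp only [pvEndNF]; exact ih _ (by omega)

theorem pvChunks_getLast (T : Int) (ps : List Int) :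
    ∀ t : Int, ps ≠ [] → ∃ a, (pvChunksNF T t ps).getLast? = some (a, pvEndNF T t ps) := by
  induction ps with
  | nil => intro t h; exact absurd rfl h
  | cons x xs ih =>
    intro t _
    cases xs with
    | nil => exact ⟨t, by simp [pvChunksNF, pvEndNF]⟩
    | cons y ys =>
      obtain ⟨a, ha⟩ := ih (min (t + x) T) (by simp)
      exact ⟨a, by simpa [pvChunksNF, pvEndNF] using ha⟩

-- every kept paragraph is a nonempty stripped string, whose split() is nonempty
theorem pv_split₀go_ne_nil (rest : List Char) :
    ∀ cur acc, (cur ≠ [] ∨ acc ≠ []) → PySem.Chars.split₀.go rest cur acc ≠ [] := by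
  induction rest with
  | nil =>
    intro cur acc h
    rw [PySem.Chars.split₀.go]
    rcases h with h | h
    · simp [List.isEmpty_iff, h]
    · by_cases hc : cur.isEmpty <;> simp [hc, h]
  | cons c rest ih =>
    intro cur acc h
    rw [PySem.Chars.split₀.go]
    by_cases hs : PySem.Chars.isspace c = true
    · by_cases hc : cur.isEmpty
      · simp only [hs, hc, if_true]
        rcases h with h | h
        · exact absurd (List.isEmpty_iff.mp hc) h
        · exact ih [] acc (Or.inr h)
      · simp only [hs, if_true, hc]
        exact ih [] (cur.reverse :: acc) (Or.inr (by simp))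
    · simp only [hs]
      exact ih (c :: cur) acc (Or.inl (by simp))

theorem pv_dropWhile_head {α : Type} (p : α → Bool) (l : List α) :
    ∀ d t, l.dropWhile p = d :: t → p d = false := by
  induction l with
  | nil => intro d t h; simp at h
  | cons a l ih =>
    intro d t h
    by_cases ha : p a
    · rw [List.dropWhile_cons_of_pos ha] at h; exact ih d t h
    · rw [List.dropWhile_cons_of_neg (by simpa using ha)] at h
      cases h; simpa using ha

-- a nonempty stripped char list starts with a non-space character
theorem pv_strip_head (cs : List Char) (h : PySem.Chars.strip cs ≠ []) :
    ∃ d t, PySem.Chars.strip cs = d :: t ∧ PySem.Chars.isspace d = false := by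
  have hstrip : PySem.Chars.strip cs
      = ((PySem.Chars.lstrip cs).reverse.dropWhile PySem.Chars.isspace).reverse := rfl
  have hsuf : (PySem.Chars.lstrip cs).reverse.dropWhile PySem.Chars.isspace
      <:+ (PySem.Chars.lstrip cs).reverse := List.dropWhile_suffix _
  have hpre : ((PySem.Chars.lstrip cs).reverse.dropWhile PySem.Chars.isspace).reverse
      <+: PySem.Chars.lstrip cs := by
    simpa using hsuf.reverse
  obtain ⟨u, hu⟩ := hpre
  rcases hr : ((PySem.Chars.lstrip cs).reverse.dropWhile PySem.Chars.isspace).reverse with _ | ⟨d, t⟩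
  · exact absurd (hstrip.trans hr) h
  · refine ⟨d, t, hstrip.trans hr, ?_⟩
    rw [hr] at hu
    have hdd : cs.dropWhile PySem.Chars.isspace = d :: (t ++ u) := by
      have : PySem.Chars.lstrip cs = d :: (t ++ u) := by simpa using hu.symm
      simpa [PySem.Chars.lstrip] using this
    exact pv_dropWhile_head PySem.Chars.isspace cs d (t ++ u) hdd

theorem pv_split₀_strip_ne_nil (cs : List Char) (h : PySem.Chars.strip cs ≠ []) :
    PySem.Chars.split₀ (PySem.Chars.strip cs) ≠ [] := by
  obtain ⟨d, t, heq, hd⟩ := pv_strip_head cs h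
  rw [heq]
  unfold PySem.Chars.split₀
  rw [PySem.Chars.split₀.go]
  simp only [hd]
  exact pv_split₀go_ne_nil t [d] [] (Or.inl (by simp))

-- each paragraph kept by the filterMap has a nonempty split()
theorem pv_para_pos (raw_text : String) :
    ∀ p ∈ ((PySem.Str.split? (PySem.Str.strip raw_text) "\n").getD []).filterMap
      (fun p => if PySem.Str.strip p ≠ "" then some (PySem.Str.strip p) else none),
      0 < (PySem.Str.split₀ p).length := by
  intro p hp
  simp only [List.mem_filterMap] at hp
  obtain ⟨q, _, hq⟩ := hp
  split_ifs at hq with hcond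
  · rw [Option.some.injEq] at hq
    subst hq
    have hlist : PySem.Chars.strip q.toList ≠ [] := by
      rw [← PySem.Str.toList_strip]
      intro hc
      exact hcond (by ext1; simp [hc])
    have hne := pv_split₀_strip_ne_nil q.toList hlist
    have hlen : (PySem.Str.split₀ (PySem.Str.strip q)).length
        = (PySem.Chars.split₀ (PySem.Chars.strip q.toList)).length := by
      have h1 := congrArg List.length (PySem.Str.split₀_map_toList (PySem.Str.strip q))
      rw [List.length_map, PySem.Str.toList_strip] at h1
      exact h1
    have hpos : 0 < (PySem.Chars.split₀ (PySem.Chars.strip q.toList)).length :=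
      List.length_pos_of_ne_nil hne
    omega

-- ===== VERDICT (by name: the statement is the Claim_ definition above) =====
theorem split_by_paragraphs_py_spec : Claim_equal_split_by_paragraphs_py := by
  intro tokens raw_text _hdom
  unfold Spec_split_by_paragraphs_py split_by_paragraphs_py split_by_paragraphs_py_alt
  dsimp only []
  set T : Int := (tokens.length : Int) with hT
  have hT0 : (0 : Int) ≤ T := by simp [hT]
  set paragraphs : List String :=
    ((PySem.Str.split? (PySem.Str.strip raw_text) "\n").getD []).filterMap
      (fun p => if PySem.Str.strip p ≠ "" then some (PySem.Str.strip p) else none) with hparas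
  by_cases hle : paragraphs.length ≤ 1
  · rw [if_pos hle, if_pos hle]
  · rw [if_neg hle, if_neg hle]
    set lengths : List Int := paragraphs.map (fun p => ((PySem.Str.split₀ p).length : Int)) with hlen
    have hpos : ∀ p ∈ paragraphs, 0 < (PySem.Str.split₀ p).length := by
      intro p hp
      exact pv_para_pos raw_text p (by rwa [hparas] at hp)
    have hnn : ∀ x ∈ lengths, 0 ≤ x := by
      intro x hx
      rw [hlen] at hx
      simp only [List.mem_map] at hx
      obtain ⟨p, hp, rfl⟩ := hx
      positivity
    have hne : lengths ≠ [] := by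
      intro hn; rw [hlen] at hn
      simp only [List.map_eq_nil_iff] at hn
      rw [hn] at hle; simp at hle
    clear_value T paragraphs lengths
    rw [pvA_fold T paragraphs [] 0 hpos]
    rw [← hlen]
    -- B's side: fold → pvBwd → bridge
    rw [pvB_fold T lengths.reverse lengths.sum [] T]
    have hbr := pv_bridge T lengths 0 hne hnn
    rw [zero_add] at hbr
    have h0T : min (0 : Int) T = 0 := by omega
    rw [h0T] at hbr
    simp only [List.nil_append]
    rw [hbr]
    -- A's conditional fixup equals pvFixLast
    have hcne : pvChunksNF T 0 lengths ≠ [] := by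
      cases lengths with
      | nil => exact absurd rfl hne
      | cons x xs => simp [pvChunksNF]
    obtain ⟨a, ha⟩ := pvChunks_getLast T lengths 0 hne
    by_cases hlt : pvEndNF T 0 lengths < T
    · rw [if_pos ⟨hlt, hcne⟩, ha]
      unfold pvFixLast
      rw [ha]
    · rw [if_neg (by exact fun hc => hlt hc.1)]
      have hend : pvEndNF T 0 lengths = T := le_antisymm (pvEnd_le T lengths 0 hT0) (by omega)
      have hlast : (pvChunksNF T 0 lengths).getLast hcne = (a, T) := by
        have hgl := List.getLast?_eq_some_getLast (l := pvChunksNF T 0 lengths) hcne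
        rw [ha, hend] at hgl
        exact (Option.some.inj hgl).symm
      unfold pvFixLast
      rw [ha, hend]
      conv_lhs => rw [← List.dropLast_concat_getLast hcne]
      rw [hlast]
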